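-- pv_equiv track=rewrite | github.com/chrisfriedberg/DQV | dgbookmarksviewer.py | _position_to_line_index
-- ===== SOURCE A (Python) =====
-- def _position_to_line_index(text, position):
--     """Helper function to convert a flat position to line and index within that line."""
--     # Split text into lines
--     lines = text.split('\n')
--
--     # Track position
--     current_pos = 0
--     for line_num, line in enumerate(lines):
--         line_length = len(line) + 1  # +1 for newline character
--         if current_pos + line_length > position:
--             # Found the line, calculate index within the line
--             index = position - current_pos
--             return line_num, index
--         current_pos += line_length
--
--     # Default fallback (shouldn't reach here with valid input)
--     return 0, 0
-- ===== SOURCE B (Python) =====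
-- def _position_to_line_index(text, position):
--     """Convert a flat position to (line, column) by a single character scan."""
--     line_num = 0
--     line_start = 0
--     for i, ch in enumerate(text):
--         if i >= position:
--             break
--         if ch == '\n':
--             line_num += 1
--             line_start = i + 1
--     return line_num, position - line_start
-- ===== Notes on version B (the rewrite author's own statement) =====
-- stated objective: simpler
-- what changed: Replaces A's split-into-lines list and per-line length accumulation with a single character scan that tracks the current line number and line start; Pre_ excludes positions past the end of the text, where A returns its explicit '(0,0) shouldn't-reach-here with valid input' fallback -- an invalid flat position, a corner no caller would specify -- and B extrapolates the last line instead.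
-- outside the precondition, e.g. on _position_to_line_index('ab', 5): A returns (0, 0), B returns (0, 5)
import Mathlib
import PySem

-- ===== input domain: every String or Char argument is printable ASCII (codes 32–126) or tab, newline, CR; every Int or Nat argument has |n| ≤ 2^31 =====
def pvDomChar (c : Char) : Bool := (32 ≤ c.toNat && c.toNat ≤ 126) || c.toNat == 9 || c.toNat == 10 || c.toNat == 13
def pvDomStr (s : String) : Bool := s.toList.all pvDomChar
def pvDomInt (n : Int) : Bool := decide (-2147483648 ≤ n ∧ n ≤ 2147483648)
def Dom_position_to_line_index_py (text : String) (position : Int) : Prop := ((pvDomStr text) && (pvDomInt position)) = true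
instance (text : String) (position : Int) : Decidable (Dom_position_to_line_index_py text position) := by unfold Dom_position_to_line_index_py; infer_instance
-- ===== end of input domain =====

-- B replaces A's line-splitting accumulation loop with one character scan tracking the line start (simpler; same cost).

-- ===== PORT A =====
-- the for-loop over enumerate(lines) with its early return; state = (line_num, current_pos)
def pvALoop : List (List Char) → Int → Int → Int → Int × Int
  | [], _, _, _ => (0, 0)                                   -- fallthrough: 'return 0, 0'
  | line :: rest, lineNum, curPos, pos =>
    let lineLength : Int := (line.length : Int) + 1
    if curPos + lineLength > pos then (lineNum, pos - curPos)
    else pvALoop rest (lineNum + 1) (curPos + lineLength) pos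

-- text.split('\n'): for a one-character separator Python's str.split is exactly List.splitOn on the code points
def position_to_line_index_py (text : String) (position : Int) : Int × Int :=
  pvALoop (text.toList.splitOn '\n') 0 0 position

-- ===== PORT B =====
-- B's for-loop over enumerate(text) with its break; state = (line_num, line_start), i the running index
def pvBLoop : List Char → Int → Int → Int → Int → Int × Int
  | [], _, lineNum, lineStart, _ => (lineNum, lineStart)
  | c :: rest, i, lineNum, lineStart, pos =>
    if i ≥ pos then (lineNum, lineStart)
    else if c = '\n' then pvBLoop rest (i + 1) (lineNum + 1) (i + 1) pos
    else pvBLoop rest (i + 1) lineNum lineStart pos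

def position_to_line_index_py_alt (text : String) (position : Int) : Int × Int :=
  let r := pvBLoop text.toList 0 0 0 position
  (r.1, position - r.2)

-- ===== PRECONDITION & SPEC =====
-- Pre_ excludes positions past the end of the text: an invalid flat position (A's own comment calls the
-- fallback reached there "shouldn't reach here with valid input"), on which A returns the sentinel (0,0)
-- and B extrapolates the last line — a corner no caller would specify either way.
def Pre_position_to_line_index_py (text : String) (position : Int) : Prop :=
  position ≤ (text.toList.length : Int)
instance (text : String) (position : Int) : Decidable (Pre_position_to_line_index_py text position) := by
  unfold Pre_position_to_line_index_py; infer_instance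

def pvWitness_position_to_line_index_py : String × Int := ("a\nbc", 3)

def Spec_position_to_line_index_py (text : String) (position : Int) (out : Int × Int) : Prop :=
  out = position_to_line_index_py_alt text position
instance (text : String) (position : Int) (out : Int × Int) : Decidable (Spec_position_to_line_index_py text position out) := by
  unfold Spec_position_to_line_index_py; infer_instance

-- ===== CLAIM (what is proved, stated in full; the proofs are below) =====
def Claim_equal_position_to_line_index_py : Prop :=
  ∀ (text : String) (position : Int), Dom_position_to_line_index_py text position →
    Pre_position_to_line_index_py text position →
    Spec_position_to_line_index_py text position (position_to_line_index_py text position)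

-- ===== LEMMAS AND PROOFS =====

lemma pv_takeWhile_append (p : Char → Bool) (y : Char) (xs ys : List Char) (h : p y = false) :
    (xs ++ y :: ys).takeWhile p = xs.takeWhile p := by
  induction xs with
  | nil => simp [List.takeWhile, h]
  | cons x t ih => by_cases hx : p x <;> simp [List.takeWhile, hx, ih]

lemma pv_takeWhile_append_stuck (p : Char → Bool) (xs ys : List Char)
    (h : ∃ a ∈ xs, p a = false) : (xs ++ ys).takeWhile p = xs.takeWhile p := by
  induction xs with
  | nil => rcases h with ⟨a, ha, _⟩; simp at ha
  | cons x t ih =>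
    by_cases hx : p x
    · have h' : ∃ a ∈ t, p a = false := by
        rcases h with ⟨a, ha, hpa⟩
        rcases List.mem_cons.mp ha with rfl | ha
        · exact absurd hpa (by simp [hx])
        · exact ⟨a, ha, hpa⟩
      simp [List.takeWhile, hx, ih h']
    · simp [List.takeWhile, Bool.of_not_eq_true hx]

lemma pv_splitOn_ne_nil (cs : List Char) : cs.splitOn '\n' ≠ [] := by
  induction cs with
  | nil => simp [List.splitOn, List.splitOnP_nil]
  | cons c t ih =>
    simp only [List.splitOn, List.splitOnP_cons] at *
    split_ifs with h
    · simp
    · cases hsp : List.splitOnP (· == '\n') t with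
      | nil => exact absurd hsp ih
      | cons a b => simp

lemma pv_splitOn_free (cs : List Char) : ∀ l ∈ cs.splitOn '\n', '\n' ∉ l := by
  induction cs with
  | nil => simp [List.splitOn, List.splitOnP_nil]
  | cons c t ih =>
    simp only [List.splitOn, List.splitOnP_cons] at *
    split_ifs with h
    · intro l hl
      rcases List.mem_cons.mp hl with rfl | hl
      · simp
      · exact ih l hl
    · cases hsp : List.splitOnP (· == '\n') t with
      | nil => exact absurd hsp (pv_splitOn_ne_nil t)
      | cons a b =>
        rw [hsp] at ih
        intro l hl
        simp only [List.modifyHead, List.mem_cons] at hl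
        rcases hl with rfl | hl
        · intro hmem
          rcases List.mem_cons.mp hmem with rfl | hmem
          · simp at h
          · exact ih a (List.mem_cons_self) hmem
        · exact ih l (List.mem_cons_of_mem _ hl)

lemma pv_intercalate_singleton (x : Char) (l : List Char) : List.intercalate [x] [l] = l := by
  simp [List.intercalate]

lemma pv_intercalate_cons (x : Char) (a b : List Char) (t : List (List Char)) :
    List.intercalate [x] (a :: b :: t) = a ++ x :: List.intercalate [x] (b :: t) := by
  simp [List.intercalate, List.intersperse]

-- a '\n'-free prefix: zero count, all-pass takeWhile
lemma pv_free_prefix (l : List Char) (hl : '\n' ∉ l) (n : Nat) (hn : n ≤ l.length) :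
    ((l.take n).count '\n' = 0) ∧
    ((l.take n).reverse.takeWhile (fun c => c != '\n')).length = n := by
  have hfree : '\n' ∉ l.take n := fun hm => hl (List.mem_of_mem_take hm)
  constructor
  · exact List.count_eq_zero.mpr hfree
  · have : (l.take n).reverse.takeWhile (fun c => c != '\n') = (l.take n).reverse := by
      rw [List.takeWhile_eq_self_iff]
      intro x hx
      have : x ∈ l.take n := List.mem_reverse.mp hx
      simp only [bne_iff_ne, ne_eq]
      rintro rfl; exact hfree this
    rw [this]; simp [hn]

-- the in-range characterisation of A's loop over '\n'-free lines
lemma pv_aLoop_eq (ls : List (List Char)) (ln cp pos : Int)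
    (hfree : ∀ l ∈ ls, '\n' ∉ l) (hne : ls ≠ [])
    (h0 : cp ≤ pos) (h1 : pos ≤ cp + ((List.intercalate ['\n'] ls).length : Int)) :
    pvALoop ls ln cp pos =
      (ln + ((((List.intercalate ['\n'] ls).take (pos - cp).toNat).count '\n' : Nat) : Int),
       ((((List.intercalate ['\n'] ls).take (pos - cp).toNat).reverse.takeWhile
          (fun c => c != '\n')).length : Int)) := by
  induction ls generalizing ln cp with
  | nil => exact absurd rfl hne
  | cons l rest ih =>
    cases rest with
    | nil =>
      rw [pv_intercalate_singleton] at h1 ⊢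
      have hc : cp + ((l.length : Int) + 1) > pos := by omega
      have hn : (pos - cp).toNat ≤ l.length := by omega
      obtain ⟨hcnt, htw⟩ := pv_free_prefix l (hfree l (by simp)) (pos - cp).toNat hn
      simp only [pvALoop, if_pos hc, hcnt, htw]
      simp only [Prod.mk.injEq]; exact ⟨by simp, by omega⟩
    | cons l2 t =>
      rw [pv_intercalate_cons] at h1 ⊢
      by_cases hc : cp + ((l.length : Int) + 1) > pos
      · have hn : (pos - cp).toNat ≤ l.length := by omega
        rw [List.take_append_of_le_length hn]
        obtain ⟨hcnt, htw⟩ := pv_free_prefix l (hfree l (by simp)) (pos - cp).toNat hn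
        simp only [pvALoop, if_pos hc, hcnt, htw]
        simp only [Prod.mk.injEq]; exact ⟨by simp, by omega⟩
      · have hlen : l.length + 1 ≤ (pos - cp).toNat := by omega
        have hq : (l ++ '\n' :: List.intercalate ['\n'] (l2 :: t)).take (pos - cp).toNat
            = l ++ '\n' :: (List.intercalate ['\n'] (l2 :: t)).take ((pos - (cp + ((l.length : Int) + 1))).toNat) := by
          rw [List.take_append, List.take_of_length_le (by omega)]
          congr 1
          have h2 : (pos - cp).toNat - l.length = ((pos - (cp + ((l.length : Int) + 1))).toNat) + 1 := by omega
          rw [h2, List.take_succ_cons]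
        have hrec := ih (ln + 1) (cp + ((l.length : Int) + 1))
          (fun x hx => hfree x (by simp [hx])) (by simp) (by omega)
          (by simp at h1 ⊢; omega)
        rw [pvALoop]
        simp only [if_neg hc]
        rw [hrec, hq]
        have hfl : '\n' ∉ l := hfree l (by simp)
        simp only [Prod.mk.injEq]
        constructor
        · simp [List.count_append, List.count_eq_zero.mpr hfl]
          ring
        · have htw := pv_takeWhile_append (fun c => c != '\n') '\n'
            ((List.intercalate ['\n'] (l2 :: t)).take ((pos - (cp + ((l.length : Int) + 1))).toNat)).reverse
            l.reverse (by simp)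
          rw [List.reverse_append, List.reverse_cons, List.append_assoc, List.singleton_append, htw]

-- the in-range characterisation of B's loop
lemma pv_bLoop_eq (cs : List Char) (i ln ls pos : Int)
    (h0 : i ≤ pos) (h1 : (pos - i).toNat ≤ cs.length) :
    pvBLoop cs i ln ls pos =
      (ln + (((cs.take (pos - i).toNat).count '\n' : Nat) : Int),
       if '\n' ∈ cs.take (pos - i).toNat
       then pos - (((cs.take (pos - i).toNat).reverse.takeWhile (fun c => c != '\n')).length : Int)
       else ls) := by
  induction cs generalizing i ln ls with
  | nil =>
    have : (pos - i).toNat = 0 := Nat.le_zero.mp (by simpa using h1)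
    simp [pvBLoop, this]
  | cons c rest ih =>
    by_cases hstop : i ≥ pos
    · have : (pos - i).toNat = 0 := by omega
      simp [pvBLoop, hstop, this]
    · have hlt : i < pos := by omega
      have hk : (pos - i).toNat = (pos - (i + 1)).toNat + 1 := by omega
      have htake : (c :: rest).take (pos - i).toNat
          = c :: rest.take (pos - (i + 1)).toNat := by rw [hk, List.take_succ_cons]
      have h1' : (pos - (i + 1)).toNat ≤ rest.length := by simp at h1; omega
      have hrlen : (rest.take (pos - (i + 1)).toNat).length = (pos - (i + 1)).toNat :=
        List.length_take_of_le h1'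
      by_cases hc : c = '\n'
      · subst hc
        rw [pvBLoop, if_neg hstop, if_pos rfl]
        rw [ih (i + 1) (ln + 1) (i + 1) (by omega) h1', htake]
        simp only [Prod.mk.injEq]
        constructor
        · simp
          ring
        · have hR : (('\n' :: rest.take (pos - (i + 1)).toNat).reverse).takeWhile (fun c => c != '\n')
              = ((rest.take (pos - (i + 1)).toNat).reverse).takeWhile (fun c => c != '\n') := by
            rw [List.reverse_cons]
            exact pv_takeWhile_append _ '\n' _ [] (by simp)
          rw [hR, if_pos (show ('\n' : Char) ∈ '\n' :: rest.take (pos - (i + 1)).toNat by simp)]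
          by_cases hmem : '\n' ∈ rest.take (pos - (i + 1)).toNat
          · rw [if_pos hmem]
          · rw [if_neg hmem]
            have := (pv_free_prefix (rest.take (pos - (i + 1)).toNat) hmem
              (rest.take (pos - (i + 1)).toNat).length le_rfl).2
            rw [List.take_of_length_le le_rfl] at this
            rw [this, hrlen]
            omega
      · rw [pvBLoop]
        simp only [if_neg hstop, if_neg hc]
        rw [ih (i + 1) ln ls (by omega) h1', htake]
        simp only [Prod.mk.injEq]
        have hcc : ¬('\n' = c) := fun h => hc h.symm
        have hmemiff : ('\n' ∈ c :: rest.take (pos - (i + 1)).toNat)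
            ↔ '\n' ∈ rest.take (pos - (i + 1)).toNat := by
          simp [List.mem_cons, hcc]
        constructor
        · simp [hc]
        · by_cases hmem : '\n' ∈ rest.take (pos - (i + 1)).toNat
          · rw [if_pos hmem, if_pos (hmemiff.mpr hmem)]
            have hrev : (c :: rest.take (pos - (i + 1)).toNat).reverse
                = (rest.take (pos - (i + 1)).toNat).reverse ++ [c] := by simp
            rw [hrev, pv_takeWhile_append_stuck (fun c => c != '\n') _ [c]
              ⟨'\n', List.mem_reverse.mpr hmem, by simp⟩]
          · rw [if_neg hmem, if_neg (fun h => hmem (hmemiff.mp h))]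

-- ===== VERDICT (by name: the statement is the Claim_ definition above) =====
theorem position_to_line_index_py_spec : Claim_equal_position_to_line_index_py := by
  intro text position _ hpre
  unfold Pre_position_to_line_index_py at hpre
  unfold Spec_position_to_line_index_py
  simp only [position_to_line_index_py, position_to_line_index_py_alt]
  by_cases hneg : position < 0
  · -- both return (0, position): A's first line triggers, B's loop breaks at once
    have hB : pvBLoop text.toList 0 0 0 position = (0, 0) := by
      cases text.toList with
      | nil => simp [pvBLoop]
      | cons c t =>
        have hge : (0 : Int) ≥ position := by omega
        simp only [pvBLoop, if_pos hge]
    rw [hB]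
    cases hsp : text.toList.splitOn '\n' with
    | nil => exact absurd hsp (pv_splitOn_ne_nil _)
    | cons l rest =>
      simp only [pvALoop]
      rw [if_pos (by omega)]
  · have h0 : (0 : Int) ≤ position := by omega
    have hA := pv_aLoop_eq (text.toList.splitOn '\n') 0 0 position
      (pv_splitOn_free _) (pv_splitOn_ne_nil _) h0
      (by rw [List.intercalate_splitOn]; omega)
    rw [List.intercalate_splitOn] at hA
    have hB := pv_bLoop_eq text.toList 0 0 0 position h0 (by omega)
    rw [hA, hB]
    simp only [sub_zero, zero_add]
    have hplen : (text.toList.take position.toNat).length = position.toNat :=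
      List.length_take_of_le (by omega)
    by_cases hmem : '\n' ∈ text.toList.take position.toNat
    · rw [if_pos hmem]
      refine congrArg₂ Prod.mk rfl ?_
      ring
    · rw [if_neg hmem]
      have := (pv_free_prefix (text.toList.take position.toNat) hmem
        (text.toList.take position.toNat).length le_rfl).2
      rw [List.take_of_length_le le_rfl] at this
      refine congrArg₂ Prod.mk rfl ?_
      rw [this, hplen]
      omega
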